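-- pv_equiv track=rewrite | github.com/dp-web4/ARC-SAGE | knowledge/game-solvers/tn36_solver.py | compute_instructions
-- ===== SOURCE A (Python) =====
-- from typing import Dict, List, Tuple, Optional
--
-- GRID_UNIT = 4  # oocxrjijjq
--
-- def compute_instructions(bx, by, brot, bscale, bcolor,
--                         tx, ty, trot, tscale, tcolor) -> List[int]:
--     """Compute instruction sequence to go from block state to target state."""
--     instructions = []
--
--     # Movement
--     dx = tx - bx
--     dy = ty - by
--
--     # Convert pixel delta to grid steps
--     x_steps = dx // GRID_UNIT
--     y_steps = dy // GRID_UNIT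
--
--     # Generate movement instructions
--     while x_steps != 0 or y_steps != 0:
--         if x_steps > 0:
--             if x_steps >= 2:
--                 instructions.append(10)  # move right double
--                 x_steps -= 2
--             else:
--                 instructions.append(2)  # move right
--                 x_steps -= 1
--         elif x_steps < 0:
--             if x_steps <= -2:
--                 instructions.append(12)  # move left double
--                 x_steps += 2
--             else:
--                 instructions.append(1)  # move left
--                 x_steps += 1
--         elif y_steps > 0:
--             instructions.append(3)  # move down
--             y_steps -= 1
--         elif y_steps < 0:
--             instructions.append(33)  # move up
--             y_steps += 1
--
--     # Rotation
--     rot_delta = (trot - brot) % 360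
--     if rot_delta == 90:
--         instructions.append(5)
--     elif rot_delta == 180:
--         instructions.append(7)
--     elif rot_delta == 270:
--         instructions.append(6)
--
--     # Scale
--     scale_delta = tscale - bscale
--     while scale_delta > 0:
--         instructions.append(8); scale_delta -= 1
--     while scale_delta < 0:
--         instructions.append(9); scale_delta += 1
--
--     # Color
--     if tcolor != bcolor:
--         if tcolor == 9: instructions.append(14)
--         elif tcolor == 8: instructions.append(15)
--         elif tcolor == 15: instructions.append(63)
--
--     return instructions
-- ===== SOURCE B (Python) =====
-- def compute_instructions(bx, by, brot, bscale, bcolor,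
--                          tx, ty, trot, tscale, tcolor):
--     """Closed-form construction of the instruction sequence (no loops over deltas)."""
--     x = (tx - bx) // 4
--     y = (ty - by) // 4
--     d, r = divmod(abs(x), 2)
--     if x > 0:
--         moves = [10] * d + [2] * r
--     elif x < 0:
--         moves = [12] * d + [1] * r
--     else:
--         moves = []
--     moves += [3] * y if y > 0 else [33] * (-y)
--     rot = {90: [5], 180: [7], 270: [6]}.get((trot - brot) % 360, [])
--     s = tscale - bscale
--     scale = [8] * s if s > 0 else [9] * (-s)
--     color = {9: [14], 8: [15], 15: [63]}.get(tcolor, []) if tcolor != bcolor else []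
--     return moves + rot + scale + color
-- ===== Notes on version B (the rewrite author's own statement) =====
-- stated objective: simpler
-- what changed: Replaced A's step-by-step while-loops for movement and scale with closed-form list-replication per axis (divmod for the double/single right-left moves), and the rotation/color if-chains with literal dict lookups.
import Mathlib
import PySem

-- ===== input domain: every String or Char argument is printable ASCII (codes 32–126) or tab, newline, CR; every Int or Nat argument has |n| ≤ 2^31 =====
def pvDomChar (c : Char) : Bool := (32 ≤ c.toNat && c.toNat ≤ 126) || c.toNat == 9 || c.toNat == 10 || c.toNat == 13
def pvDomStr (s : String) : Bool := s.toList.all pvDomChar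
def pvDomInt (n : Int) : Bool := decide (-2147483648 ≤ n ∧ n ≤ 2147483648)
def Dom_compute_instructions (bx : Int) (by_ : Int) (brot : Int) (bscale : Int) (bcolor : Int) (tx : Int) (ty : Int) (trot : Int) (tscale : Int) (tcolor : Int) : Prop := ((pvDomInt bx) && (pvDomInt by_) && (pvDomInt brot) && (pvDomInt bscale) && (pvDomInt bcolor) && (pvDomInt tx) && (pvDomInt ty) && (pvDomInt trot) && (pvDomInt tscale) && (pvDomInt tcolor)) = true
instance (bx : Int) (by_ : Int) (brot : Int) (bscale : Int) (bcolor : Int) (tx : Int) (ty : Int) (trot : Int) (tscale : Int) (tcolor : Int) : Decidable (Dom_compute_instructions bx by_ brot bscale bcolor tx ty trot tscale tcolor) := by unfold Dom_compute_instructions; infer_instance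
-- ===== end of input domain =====

-- B replaces A's step-by-step movement/scale while-loops by a closed-form
-- List.replicate construction per axis and dict lookups for rotation/color (objective: simpler).

-- ===== PORT A =====
-- A's movement while-loop (x_steps consumed first — doubles then a single — then y_steps);
-- fuel = |x_steps| + |y_steps| single-step decrements, exactly enough for the loop to finish.
def aMoveLoopF : Nat → Int → Int → List Int → List Int
  | 0, _, _, acc => acc
  | n + 1, x, y, acc =>
    if x > 0 then
      (if x ≥ 2 then aMoveLoopF n (x - 2) y (acc ++ [10]) else aMoveLoopF n (x - 1) y (acc ++ [2]))
    else if x < 0 then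
      (if x ≤ -2 then aMoveLoopF n (x + 2) y (acc ++ [12]) else aMoveLoopF n (x + 1) y (acc ++ [1]))
    else if y > 0 then aMoveLoopF n x (y - 1) (acc ++ [3])
    else if y < 0 then aMoveLoopF n x (y + 1) (acc ++ [33])
    else acc

def aMoveLoop (x y : Int) (acc : List Int) : List Int :=
  aMoveLoopF (x.natAbs + y.natAbs) x y acc

-- A's 'while scale_delta > 0' loop (fuel = s.toNat, one unit per iteration)
def aScaleUpF : Nat → Int → List Int → List Int
  | 0, _, acc => acc
  | n + 1, s, acc => if s > 0 then aScaleUpF n (s - 1) (acc ++ [8]) else acc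

def aScaleUp (s : Int) (acc : List Int) : List Int := aScaleUpF s.toNat s acc

-- A's 'while scale_delta < 0' loop (fuel = (-s).toNat)
def aScaleDownF : Nat → Int → List Int → List Int
  | 0, _, acc => acc
  | n + 1, s, acc => if s < 0 then aScaleDownF n (s + 1) (acc ++ [9]) else acc

def aScaleDown (s : Int) (acc : List Int) : List Int := aScaleDownF (-s).toNat s acc

def compute_instructions (bx : Int) (by_ : Int) (brot : Int) (bscale : Int) (bcolor : Int) (tx : Int) (ty : Int) (trot : Int) (tscale : Int) (tcolor : Int) : List Int :=
  let dx := tx - bx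
  let dy := ty - by_
  let x_steps := PySem.Int.floordiv dx 4
  let y_steps := PySem.Int.floordiv dy 4
  let instructions := aMoveLoop x_steps y_steps []
  let rot_delta := PySem.Int.mod (trot - brot) 360
  let instructions :=
    if rot_delta = 90 then instructions ++ [5]
    else if rot_delta = 180 then instructions ++ [7]
    else if rot_delta = 270 then instructions ++ [6]
    else instructions
  let scale_delta := tscale - bscale
  let instructions := aScaleUp scale_delta instructions
  let instructions := aScaleDown scale_delta instructions
  if tcolor ≠ bcolor then
    (if tcolor = 9 then instructions ++ [14]
     else if tcolor = 8 then instructions ++ [15]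
     else if tcolor = 15 then instructions ++ [63]
     else instructions)
  else instructions

-- ===== PORT B =====
def compute_instructions_alt (bx : Int) (by_ : Int) (brot : Int) (bscale : Int) (bcolor : Int) (tx : Int) (ty : Int) (trot : Int) (tscale : Int) (tcolor : Int) : List Int :=
  let x := PySem.Int.floordiv (tx - bx) 4
  let y := PySem.Int.floordiv (ty - by_) 4
  let d := x.natAbs / 2
  let r := x.natAbs % 2
  let moves :=
    if x > 0 then List.replicate d 10 ++ List.replicate r 2
    else if x < 0 then List.replicate d 12 ++ List.replicate r 1
    else ([] : List Int)
  let moves := moves ++ (if y > 0 then List.replicate y.toNat 3 else List.replicate (-y).toNat 33)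
  let rot := ((PySem.Dict.ofList [((90:Int), [(5:Int)]), (180, [7]), (270, [6])]).get? (PySem.Int.mod (trot - brot) 360)).getD []
  let s := tscale - bscale
  let scale := if s > 0 then List.replicate s.toNat 8 else List.replicate (-s).toNat 9
  let color := if tcolor ≠ bcolor then ((PySem.Dict.ofList [((9:Int), [(14:Int)]), (8, [15]), (15, [63])]).get? tcolor).getD [] else []
  moves ++ rot ++ scale ++ color

-- ===== PRECONDITION & SPEC =====
def Spec_compute_instructions (bx : Int) (by_ : Int) (brot : Int) (bscale : Int) (bcolor : Int) (tx : Int) (ty : Int) (trot : Int) (tscale : Int) (tcolor : Int) (out : List Int) : Prop := out = compute_instructions_alt bx by_ brot bscale bcolor tx ty trot tscale tcolor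
instance (bx : Int) (by_ : Int) (brot : Int) (bscale : Int) (bcolor : Int) (tx : Int) (ty : Int) (trot : Int) (tscale : Int) (tcolor : Int) (out : List Int) : Decidable (Spec_compute_instructions bx by_ brot bscale bcolor tx ty trot tscale tcolor out) := by unfold Spec_compute_instructions; infer_instance

-- ===== CLAIM (what is proved, stated in full; the proofs are below) =====
def Claim_equal_compute_instructions : Prop := ∀ (bx : Int) (by_ : Int) (brot : Int) (bscale : Int) (bcolor : Int) (tx : Int) (ty : Int) (trot : Int) (tscale : Int) (tcolor : Int), Dom_compute_instructions bx by_ brot bscale bcolor tx ty trot tscale tcolor → Spec_compute_instructions bx by_ brot bscale bcolor tx ty trot tscale tcolor (compute_instructions bx by_ brot bscale bcolor tx ty trot tscale tcolor)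

-- ===== LEMMAS AND PROOFS =====

-- closed form of A's movement loop, x part and y part
def xPart (x : Int) : List Int :=
  if x > 0 then List.replicate (x.natAbs / 2) 10 ++ List.replicate (x.natAbs % 2) 2
  else if x < 0 then List.replicate (x.natAbs / 2) 12 ++ List.replicate (x.natAbs % 2) 1
  else []

def yPart (y : Int) : List Int :=
  if y > 0 then List.replicate y.toNat 3 else List.replicate (-y).toNat 33

lemma xPart_zero : xPart 0 = [] := rfl

lemma yPart_zero : yPart 0 = [] := rfl

lemma xPart_step_r2 (x : Int) (h : x ≥ 2) : xPart x = 10 :: xPart (x - 2) := by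
  have h1 : x.natAbs / 2 = (x - 2).natAbs / 2 + 1 := by omega
  have h2 : x.natAbs % 2 = (x - 2).natAbs % 2 := by omega
  by_cases hx2 : x - 2 > 0
  · simp only [xPart, if_pos (by omega : x > 0), if_pos hx2, h1, h2, List.replicate_succ,
      List.cons_append]
  · have hx : x = 2 := by omega
    subst hx; rfl

lemma xPart_step_l2 (x : Int) (h : x ≤ -2) : xPart x = 12 :: xPart (x + 2) := by
  have h1 : x.natAbs / 2 = (x + 2).natAbs / 2 + 1 := by omega
  have h2 : x.natAbs % 2 = (x + 2).natAbs % 2 := by omega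
  by_cases hx2 : x + 2 < 0
  · simp only [xPart, if_neg (by omega : ¬ x > 0), if_pos (by omega : x < 0),
      if_neg (by omega : ¬ x + 2 > 0), if_pos hx2, h1, h2, List.replicate_succ, List.cons_append]
  · have hx : x = -2 := by omega
    subst hx; rfl

lemma yPart_step_d (y : Int) (h : y > 0) : yPart y = 3 :: yPart (y - 1) := by
  have ht : y.toNat = (y - 1).toNat + 1 := by omega
  by_cases hy : y - 1 > 0
  · simp only [yPart, if_pos h, if_pos hy, ht, List.replicate_succ]
  · have hy1 : y = 1 := by omega
    subst hy1; rfl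

lemma yPart_step_u (y : Int) (h : y < 0) : yPart y = 33 :: yPart (y + 1) := by
  have ht : (-y).toNat = (-(y + 1)).toNat + 1 := by omega
  simp only [yPart, if_neg (by omega : ¬ y > 0), if_neg (by omega : ¬ y + 1 > 0), ht,
    List.replicate_succ]

lemma aMoveLoopF_eq (n : Nat) : ∀ (x y : Int) (acc : List Int),
    x.natAbs + y.natAbs ≤ n → aMoveLoopF n x y acc = acc ++ xPart x ++ yPart y := by
  induction n with
  | zero =>
      intro x y acc h
      have hx : x = 0 := by omega
      have hy : y = 0 := by omega
      subst hx; subst hy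
      simp [aMoveLoopF, xPart_zero, yPart_zero]
  | succ n ih =>
      intro x y acc h
      by_cases h1 : x > 0
      · by_cases h2 : x ≥ 2
        · rw [show aMoveLoopF (n + 1) x y acc = aMoveLoopF n (x - 2) y (acc ++ [10]) from by
            simp only [aMoveLoopF, if_pos h1, if_pos h2]]
          rw [ih _ _ _ (by omega), xPart_step_r2 x h2]
          simp
        · rw [show aMoveLoopF (n + 1) x y acc = aMoveLoopF n (x - 1) y (acc ++ [2]) from by
            simp only [aMoveLoopF, if_pos h1, if_neg h2]]
          rw [ih _ _ _ (by omega)]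
          have hx : x = 1 := by omega
          subst hx
          simp [show xPart 1 = [2] from rfl, xPart_zero]
      by_cases h3 : x < 0
      · by_cases h4 : x ≤ -2
        · rw [show aMoveLoopF (n + 1) x y acc = aMoveLoopF n (x + 2) y (acc ++ [12]) from by
            simp only [aMoveLoopF, if_neg h1, if_pos h3, if_pos h4]]
          rw [ih _ _ _ (by omega), xPart_step_l2 x h4]
          simp
        · rw [show aMoveLoopF (n + 1) x y acc = aMoveLoopF n (x + 1) y (acc ++ [1]) from by
            simp only [aMoveLoopF, if_neg h1, if_pos h3, if_neg h4]]
          rw [ih _ _ _ (by omega)]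
          have hx : x = -1 := by omega
          subst hx
          simp [show xPart (-1) = [1] from rfl, xPart_zero]
      have hx : x = 0 := by omega
      subst hx
      by_cases h5 : y > 0
      · rw [show aMoveLoopF (n + 1) 0 y acc = aMoveLoopF n 0 (y - 1) (acc ++ [3]) from by
          simp only [aMoveLoopF, if_neg h1, if_neg h3, if_pos h5]]
        rw [ih _ _ _ (by omega), yPart_step_d y h5]
        simp [xPart_zero]
      by_cases h6 : y < 0
      · rw [show aMoveLoopF (n + 1) 0 y acc = aMoveLoopF n 0 (y + 1) (acc ++ [33]) from by
          simp only [aMoveLoopF, if_neg h1, if_neg h3, if_neg h5, if_pos h6]]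
        rw [ih _ _ _ (by omega), yPart_step_u y h6]
        simp [xPart_zero]
      have hy : y = 0 := by omega
      subst hy
      simp [aMoveLoopF, xPart_zero, yPart_zero]

lemma aMoveLoop_eq (x y : Int) (acc : List Int) :
    aMoveLoop x y acc = acc ++ xPart x ++ yPart y :=
  aMoveLoopF_eq (x.natAbs + y.natAbs) x y acc (le_refl _)

lemma aScaleUpF_eq (n : Nat) : ∀ (s : Int) (acc : List Int), s.toNat ≤ n →
    aScaleUpF n s acc = acc ++ List.replicate s.toNat 8 := by
  induction n with
  | zero =>
      intro s acc h
      rw [show s.toNat = 0 from by omega]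
      simp [aScaleUpF]
  | succ n ih =>
      intro s acc h
      by_cases hs : s > 0
      · rw [show aScaleUpF (n + 1) s acc = aScaleUpF n (s - 1) (acc ++ [8]) from by
          simp only [aScaleUpF, if_pos hs]]
        rw [ih _ _ (by omega), show s.toNat = (s - 1).toNat + 1 from by omega,
          List.replicate_succ]
        simp
      · rw [show aScaleUpF (n + 1) s acc = acc from by simp only [aScaleUpF, if_neg hs]]
        rw [show s.toNat = 0 from by omega]
        simp

lemma aScaleDownF_eq (n : Nat) : ∀ (s : Int) (acc : List Int), (-s).toNat ≤ n →
    aScaleDownF n s acc = acc ++ List.replicate (-s).toNat 9 := by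
  induction n with
  | zero =>
      intro s acc h
      rw [show (-s).toNat = 0 from by omega]
      simp [aScaleDownF]
  | succ n ih =>
      intro s acc h
      by_cases hs : s < 0
      · rw [show aScaleDownF (n + 1) s acc = aScaleDownF n (s + 1) (acc ++ [9]) from by
          simp only [aScaleDownF, if_pos hs]]
        rw [ih _ _ (by omega), show (-s).toNat = (-(s + 1)).toNat + 1 from by omega,
          List.replicate_succ]
        simp
      · rw [show aScaleDownF (n + 1) s acc = acc from by simp only [aScaleDownF, if_neg hs]]
        rw [show (-s).toNat = 0 from by omega]
        simp

-- A's two scale loops in sequence append exactly B's scale list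
lemma scaleTail (s : Int) (l : List Int) :
    aScaleDown s (aScaleUp s l) =
      l ++ (if s > 0 then List.replicate s.toNat 8 else List.replicate (-s).toNat 9) := by
  rw [aScaleUp, aScaleDown, aScaleUpF_eq s.toNat s l (le_refl _),
    aScaleDownF_eq (-s).toNat s _ (le_refl _)]
  by_cases h : s > 0
  · rw [if_pos h, show (-s).toNat = 0 from by omega]; simp
  · rw [if_neg h, show s.toNat = 0 from by omega]; simp

-- B's inline movement if-expressions are xPart / yPart
lemma xPart_def (x : Int) :
    (if x > 0 then List.replicate (x.natAbs / 2) 10 ++ List.replicate (x.natAbs % 2) 2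
     else if x < 0 then List.replicate (x.natAbs / 2) 12 ++ List.replicate (x.natAbs % 2) 1
     else ([] : List Int)) = xPart x := rfl

lemma yPart_def (y : Int) :
    (if y > 0 then List.replicate y.toNat 3 else List.replicate (-y).toNat 33) = yPart y := rfl

-- B's rotation dict lookup equals A's if-chain
lemma rotLookup (rd : Int) :
    ((PySem.Dict.ofList [((90:Int), [(5:Int)]), (180, [7]), (270, [6])]).get? rd).getD [] =
      (if rd = 90 then [(5:Int)] else if rd = 180 then [7] else if rd = 270 then [6] else []) := by
  by_cases h90 : rd = 90
  · subst h90; rfl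
  by_cases h180 : rd = 180
  · subst h180; rfl
  by_cases h270 : rd = 270
  · subst h270; rfl
  have hnone : (PySem.Dict.ofList [((90:Int), [(5:Int)]), (180, [7]), (270, [6])]).get? rd = none := by
    rw [PySem.Dict.get?_eq_none_iff_not_mem_keys,
      show (PySem.Dict.ofList [((90:Int), [(5:Int)]), (180, [7]), (270, [6])]).keys = [90, 180, 270]
        from rfl]
    simp [h90, h180, h270]
  rw [hnone, if_neg h90, if_neg h180, if_neg h270]
  rfl

-- B's color dict lookup equals A's if-chain
lemma colLookup (c : Int) :
    ((PySem.Dict.ofList [((9:Int), [(14:Int)]), (8, [15]), (15, [63])]).get? c).getD [] =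
      (if c = 9 then [(14:Int)] else if c = 8 then [15] else if c = 15 then [63] else []) := by
  by_cases h9 : c = 9
  · subst h9; rfl
  by_cases h8 : c = 8
  · subst h8; rfl
  by_cases h15 : c = 15
  · subst h15; rfl
  have hnone : (PySem.Dict.ofList [((9:Int), [(14:Int)]), (8, [15]), (15, [63])]).get? c = none := by
    rw [PySem.Dict.get?_eq_none_iff_not_mem_keys,
      show (PySem.Dict.ofList [((9:Int), [(14:Int)]), (8, [15]), (15, [63])]).keys = [9, 8, 15]
        from rfl]
    simp [h9, h8, h15]
  rw [hnone, if_neg h9, if_neg h8, if_neg h15]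
  rfl

-- A appends the rotation / color instruction inside each if-branch; pulled out as one concatenation
lemma rot_dist (L : List Int) (rd : Int) :
    (if rd = 90 then L ++ [5] else if rd = 180 then L ++ [7] else if rd = 270 then L ++ [6] else L)
      = L ++ (if rd = 90 then [5] else if rd = 180 then [7] else if rd = 270 then [6] else []) := by
  split_ifs <;> simp

lemma col_dist (L : List Int) (bc tc : Int) :
    (if tc ≠ bc then
       (if tc = 9 then L ++ [14] else if tc = 8 then L ++ [15] else if tc = 15 then L ++ [63] else L)
     else L)
      = L ++ (if tc ≠ bc then
          (if tc = 9 then [14] else if tc = 8 then [15] else if tc = 15 then [63] else [])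
        else []) := by
  split_ifs <;> simp

-- ===== VERDICT (by name: the statement is the Claim_ definition above) =====
theorem compute_instructions_spec : Claim_equal_compute_instructions := by
  intro bx by_ brot bscale bcolor tx ty trot tscale tcolor _
  unfold Spec_compute_instructions compute_instructions compute_instructions_alt
  simp only [aMoveLoop_eq, rotLookup, colLookup, xPart_def, yPart_def, List.nil_append]
  rw [scaleTail, col_dist, rot_dist]
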